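-- pv_equiv track=rewrite | github.com/gzharov/tensorflow_object_counting_api_documents | image_detection.py | get_greed_rectangles_universal
-- ===== SOURCE A (Python) =====
-- def get_greed_rectangles_universal(img_width, img_height, rectangle_shapes_part, shift_forward_part, shift_down_part):
--
--     rectangle_shapes = [0,0]
--     rectangle_shapes[0] = round(img_width/rectangle_shapes_part[0])
--     rectangle_shapes[1] = round(img_height/rectangle_shapes_part[1])
--     shift_forward = round(img_width/shift_forward_part)
--     shift_down = round(img_height/shift_down_part)
--
--
--     if img_width<img_height:
--         t = rectangle_shapes[0]
--         rectangle_shapes[0] = rectangle_shapes[1]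
--         rectangle_shapes[1] = t
--
--         t2 = shift_forward
--         shift_forward = shift_down
--         shift_down = t2
--
--
--
--     greed_rectangles = []
--     right_bottom_angle = [rectangle_shapes[0], rectangle_shapes[1]]
--
--
--     while (right_bottom_angle[1]<=img_height):
--
--         greed_rectangles.append([right_bottom_angle[0]-rectangle_shapes[0], right_bottom_angle[0], right_bottom_angle[1] - rectangle_shapes[1] , right_bottom_angle[1]])
--
--         right_bottom_angle[0]+=shift_forward
--
--         if right_bottom_angle[0] > img_width:
--             right_bottom_angle[0] = rectangle_shapes[0]
--             right_bottom_angle[1] = right_bottom_angle[1]+shift_down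
--
--     return greed_rectangles
-- ===== SOURCE B (Python) =====
-- def get_greed_rectangles_universal(img_width, img_height, rectangle_shapes_part, shift_forward_part, shift_down_part):
--     # same preamble as the original: rounded cell sizes/shifts, swapped for portrait images
--     rect_w = round(img_width / rectangle_shapes_part[0])
--     rect_h = round(img_height / rectangle_shapes_part[1])
--     shift_forward = round(img_width / shift_forward_part)
--     shift_down = round(img_height / shift_down_part)
--     if img_width < img_height:
--         rect_w, rect_h = rect_h, rect_w
--         shift_forward, shift_down = shift_down, shift_forward
--
--     # closed-form grid dimensions instead of iterating the (x, y) state: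
--     # rows y = rect_h + i*shift_down while y <= img_height;
--     # columns x = rect_w + j*shift_forward, the first column always present
--     # (do-while), further ones while they still fit.
--     if img_height < rect_h:
--         nrows = 0
--     else:
--         nrows = (img_height - rect_h) // shift_down + 1
--     if shift_forward > 0 and rect_w + shift_forward <= img_width:
--         ncols = (img_width - rect_w) // shift_forward + 1
--     else:
--         ncols = 1
--     return [[j * shift_forward, j * shift_forward + rect_w,
--              i * shift_down, i * shift_down + rect_h]
--             for i in range(nrows) for j in range(ncols)]
-- ===== Notes on version B (the rewrite author's own statement) =====
-- stated objective: alternative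
-- what changed: A's while-loop that walks an (x,y) state rectangle by rectangle is replaced by a closed form: the numbers of rows and columns are computed by floor division and the rectangles are generated by a comprehension over the two index ranges.
import Mathlib
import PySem

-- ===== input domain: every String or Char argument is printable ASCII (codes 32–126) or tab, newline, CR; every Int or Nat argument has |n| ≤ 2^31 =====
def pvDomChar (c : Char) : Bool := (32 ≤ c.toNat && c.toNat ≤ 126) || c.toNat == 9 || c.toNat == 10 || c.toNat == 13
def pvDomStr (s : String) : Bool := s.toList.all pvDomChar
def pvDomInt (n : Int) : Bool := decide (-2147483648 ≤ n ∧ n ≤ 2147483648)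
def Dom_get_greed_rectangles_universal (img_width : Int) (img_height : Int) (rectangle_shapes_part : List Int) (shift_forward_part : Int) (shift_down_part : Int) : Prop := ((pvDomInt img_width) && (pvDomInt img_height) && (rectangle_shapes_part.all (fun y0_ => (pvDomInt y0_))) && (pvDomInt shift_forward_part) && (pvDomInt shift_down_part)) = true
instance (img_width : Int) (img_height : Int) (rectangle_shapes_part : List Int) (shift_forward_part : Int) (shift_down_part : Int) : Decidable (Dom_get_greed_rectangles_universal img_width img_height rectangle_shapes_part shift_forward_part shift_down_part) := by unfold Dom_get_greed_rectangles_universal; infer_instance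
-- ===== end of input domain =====

-- B replaces A's stateful while-loop over (x, y) by a closed form: row/column counts computed
-- by floor division, rectangles generated by a comprehension over the index ranges; objective:
-- alternative algorithm, no speed claim.  Equality is about the RETURN value; neither version
-- observably mutates its arguments.

-- Python round(a/b) for integers a, b (b ≠ 0): round-half-to-even of the exact rational a/b.
-- Exact on the stated domain |a|,|b| ≤ 2^31: the float quotient a/b is then never closer than
-- half an ulp to a half-integer boundary it is not exactly equal to (|a| < 2^52), so rounding
-- the double agrees with rounding the rational.  Shared by both ports (same Python line).
def pvRound (a b : Int) : Int :=
  if b = 0 then 0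
  else
    let a' := if b < 0 then -a else a
    let b' := if b < 0 then -b else b
    let q := PySem.Int.floordiv a' b'
    let r := PySem.Int.mod a' b'
    if 2 * r < b' then q
    else if b' < 2 * r then q + 1
    else if PySem.Int.mod q 2 = 0 then q else q + 1

-- ===== PORT A =====
-- A's single while-loop over the state (x, y) = right_bottom_angle, appending one rectangle per
-- iteration and resetting x to rs0 / stepping y by sd when x + sf overruns img_width.
-- The leading guard only bails out of the states on which Python's loop would DIVERGE
-- (sd ≤ 0, or sf ≤ 0 with x + sf ≤ w, while y ≤ h); it is a totality guard: wherever the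
-- Python returns, the guard holds at every reached state and the port computes the same value.
def pvLoopA (w h rs0 rs1 sf sd x y : Int) : List (List Int) :=
  if hG : 1 ≤ sd ∧ (1 ≤ sf ∨ w < x + sf) then
    if hY : y ≤ h then
      [x - rs0, x, y - rs1, y] ::
        (if hX : w < x + sf then pvLoopA w h rs0 rs1 sf sd rs0 (y + sd)
         else pvLoopA w h rs0 rs1 sf sd (x + sf) y)
    else []
  else []
termination_by ((h - y + 1).toNat, (w - x).toNat)
decreasing_by
  · exact Prod.Lex.left _ _ (by omega)
  · exact Prod.Lex.right' _ (by omega) (by omega)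

def get_greed_rectangles_universal (img_width : Int) (img_height : Int) (rectangle_shapes_part : List Int) (shift_forward_part : Int) (shift_down_part : Int) : List (List Int) :=
  let rs0₀ := pvRound img_width (PySem.List.pyGetD rectangle_shapes_part 0 0)
  let rs1₀ := pvRound img_height (PySem.List.pyGetD rectangle_shapes_part 1 0)
  let sf₀ := pvRound img_width shift_forward_part
  let sd₀ := pvRound img_height shift_down_part
  let rs0 := if img_width < img_height then rs1₀ else rs0₀
  let rs1 := if img_width < img_height then rs0₀ else rs1₀
  let sf := if img_width < img_height then sd₀ else sf₀
  let sd := if img_width < img_height then sf₀ else sd₀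
  pvLoopA img_width img_height rs0 rs1 sf sd rs0 rs1

-- ===== PORT B =====
-- B: same preamble, then the grid in closed form — nrows rows (y = rect_h + i·sd while ≤ h),
-- ncols columns (x = rect_w + j·sf; the first column always present, further ones while they
-- fit), rectangles produced by a comprehension over range(nrows) × range(ncols).
def get_greed_rectangles_universal_alt (img_width : Int) (img_height : Int) (rectangle_shapes_part : List Int) (shift_forward_part : Int) (shift_down_part : Int) : List (List Int) :=
  let rw₀ := pvRound img_width (PySem.List.pyGetD rectangle_shapes_part 0 0)
  let rh₀ := pvRound img_height (PySem.List.pyGetD rectangle_shapes_part 1 0)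
  let sf₀ := pvRound img_width shift_forward_part
  let sd₀ := pvRound img_height shift_down_part
  let rect_w := if img_width < img_height then rh₀ else rw₀
  let rect_h := if img_width < img_height then rw₀ else rh₀
  let sf := if img_width < img_height then sd₀ else sf₀
  let sd := if img_width < img_height then sf₀ else sd₀
  let nrows := if img_height < rect_h then 0 else PySem.Int.floordiv (img_height - rect_h) sd + 1
  let ncols := if 0 < sf ∧ rect_w + sf ≤ img_width then PySem.Int.floordiv (img_width - rect_w) sf + 1 else 1
  (PySem.List.pyRange 0 nrows 1).flatMap (fun i =>
    (PySem.List.pyRange 0 ncols 1).map (fun j =>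
      [j * sf, j * sf + rect_w, i * sd, i * sd + rect_h]))

-- ===== PRECONDITION & SPEC =====
-- Pre_ excludes exactly the inputs on which Python A does not return: a rectangle_shapes_part
-- with fewer than two entries (IndexError), a zero divisor (ZeroDivisionError), and the
-- parameter combinations on which the while-loop never terminates (the computed shift_down is
-- ≤ 0, or shift_forward is ≤ 0 and never pushes x past img_width, while the first row already
-- fits, i.e. rs1 ≤ img_height).
def Pre_get_greed_rectangles_universal (img_width : Int) (img_height : Int) (rectangle_shapes_part : List Int) (shift_forward_part : Int) (shift_down_part : Int) : Prop :=
  2 ≤ rectangle_shapes_part.length ∧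
  PySem.List.pyGetD rectangle_shapes_part 0 0 ≠ 0 ∧
  PySem.List.pyGetD rectangle_shapes_part 1 0 ≠ 0 ∧
  shift_forward_part ≠ 0 ∧ shift_down_part ≠ 0 ∧
  (let rs0₀ := pvRound img_width (PySem.List.pyGetD rectangle_shapes_part 0 0)
   let rs1₀ := pvRound img_height (PySem.List.pyGetD rectangle_shapes_part 1 0)
   let sf₀ := pvRound img_width shift_forward_part
   let sd₀ := pvRound img_height shift_down_part
   let rs0 := if img_width < img_height then rs1₀ else rs0₀
   let rs1 := if img_width < img_height then rs0₀ else rs1₀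
   let sf := if img_width < img_height then sd₀ else sf₀
   let sd := if img_width < img_height then sf₀ else sd₀
   img_height < rs1 ∨ (1 ≤ sd ∧ (1 ≤ sf ∨ img_width < rs0 + sf)))
instance (img_width : Int) (img_height : Int) (rectangle_shapes_part : List Int) (shift_forward_part : Int) (shift_down_part : Int) : Decidable (Pre_get_greed_rectangles_universal img_width img_height rectangle_shapes_part shift_forward_part shift_down_part) := by unfold Pre_get_greed_rectangles_universal; infer_instance

def pvWitness_get_greed_rectangles_universal : Int × Int × List Int × Int × Int := (10, 8, [2, 2], 2, 2)

def Spec_get_greed_rectangles_universal (img_width : Int) (img_height : Int) (rectangle_shapes_part : List Int) (shift_forward_part : Int) (shift_down_part : Int) (out : List (List Int)) : Prop := out = get_greed_rectangles_universal_alt img_width img_height rectangle_shapes_part shift_forward_part shift_down_part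
instance (img_width : Int) (img_height : Int) (rectangle_shapes_part : List Int) (shift_forward_part : Int) (shift_down_part : Int) (out : List (List Int)) : Decidable (Spec_get_greed_rectangles_universal img_width img_height rectangle_shapes_part shift_forward_part shift_down_part out) := by unfold Spec_get_greed_rectangles_universal; infer_instance

-- ===== CLAIM (what is proved, stated in full; the proofs are below) =====
def Claim_equal_get_greed_rectangles_universal : Prop := ∀ (img_width : Int) (img_height : Int) (rectangle_shapes_part : List Int) (shift_forward_part : Int) (shift_down_part : Int), Dom_get_greed_rectangles_universal img_width img_height rectangle_shapes_part shift_forward_part shift_down_part → Pre_get_greed_rectangles_universal img_width img_height rectangle_shapes_part shift_forward_part shift_down_part → Spec_get_greed_rectangles_universal img_width img_height rectangle_shapes_part shift_forward_part shift_down_part (get_greed_rectangles_universal img_width img_height rectangle_shapes_part shift_forward_part shift_down_part)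

-- ===== LEMMAS AND PROOFS =====

-- Proof-only helpers: the column count of a row whose next x is `x`, and the row count from `y`.
def pvNcols (w sf x : Int) : Int :=
  if 0 < sf ∧ x + sf ≤ w then PySem.Int.floordiv (w - x) sf + 1 else 1

def pvNrows (h sd y : Int) : Int :=
  if h < y then 0 else PySem.Int.floordiv (h - y) sd + 1

-- One row of A's walk, as its own recursion (proof device only).
def pvRowAux (w rs0 rs1 sf y x : Int) : List (List Int) :=
  if hX : w < x + sf then [[x - rs0, x, y - rs1, y]]
  else if hS : 1 ≤ sf then [x - rs0, x, y - rs1, y] :: pvRowAux w rs0 rs1 sf y (x + sf)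
  else [[x - rs0, x, y - rs1, y]]
termination_by (w - x).toNat
decreasing_by omega

theorem pvList4 {a b c d a' b' c' d' : Int} (h1 : a = a') (h2 : b = b')
    (h3 : c = c') (h4 : d = d') : ([a, b, c, d] : List Int) = [a', b', c', d'] := by
  rw [h1, h2, h3, h4]

theorem pvNcols_nonneg (w sf x : Int) (hsf : 0 < sf) : 0 ≤ pvNcols w sf x := by
  unfold pvNcols
  split_ifs with h
  · have h1 : (1 : Int) ≤ PySem.Int.floordiv (w - x) sf := by
      rw [PySem.Int.le_floordiv_iff_mul_le hsf]; omega
    omega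
  · omega

-- Index-shift for a map over range(n+1).
theorem pyRange_map_shift {α : Type} (n : Int) (hn : 0 ≤ n) (f : Int → α) :
    (PySem.List.pyRange 0 (n + 1) 1).map f
      = f 0 :: (PySem.List.pyRange 0 n 1).map (fun j => f (j + 1)) := by
  rw [PySem.List.pyRange_one, PySem.List.pyRange_one]
  have h1 : (n + 1 - 0).toNat = (n - 0).toNat + 1 := by omega
  rw [h1, List.range_succ_eq_map]
  simp only [List.map_map, List.map_cons]
  congr 1
  all_goals
    apply List.map_congr_left
    intro k _
    simp only [Function.comp_apply]
    congr 1
    push_cast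
    ring

-- Same shift for flatMap.
theorem pyRange_flatMap_shift {α : Type} (n : Int) (hn : 0 ≤ n) (g : Int → List α) :
    (PySem.List.pyRange 0 (n + 1) 1).flatMap g
      = g 0 ++ (PySem.List.pyRange 0 n 1).flatMap (fun i => g (i + 1)) := by
  rw [List.flatMap_def, List.flatMap_def, pyRange_map_shift n hn g]
  simp

-- A's row walk in closed form.
theorem pvRowAux_closed (w rs0 rs1 sf y : Int) : ∀ x,
    pvRowAux w rs0 rs1 sf y x
      = (PySem.List.pyRange 0 (pvNcols w sf x) 1).map
          (fun j => [x - rs0 + j * sf, x + j * sf, y - rs1, y]) := by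
  intro x
  by_cases hX : w < x + sf
  · have hc : pvNcols w sf x = 1 := by unfold pvNcols; split_ifs with h <;> omega
    rw [pvRowAux, hc]
    have : PySem.List.pyRange 0 1 1 = [0] := by decide
    simp [hX, this]
  · by_cases hS : 1 ≤ sf
    · -- key: column count steps down by one
      have hrec : pvNcols w sf x = pvNcols w sf (x + sf) + 1 := by
        have hcx : pvNcols w sf x = PySem.Int.floordiv (w - x) sf + 1 := by
          unfold pvNcols; split_ifs with h <;> omega
        by_cases h2 : x + sf + sf ≤ w
        · have hq : pvNcols w sf (x + sf) = PySem.Int.floordiv (w - (x + sf)) sf + 1 := by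
            unfold pvNcols; split_ifs with h <;> omega
          set q := PySem.Int.floordiv (w - (x + sf)) sf with hqdef
          have hb : q * sf ≤ w - (x + sf) ∧ w - (x + sf) < (q + 1) * sf := by
            rw [← PySem.Int.floordiv_eq_iff_of_pos (by omega)]
          have : PySem.Int.floordiv (w - x) sf = q + 1 := by
            rw [PySem.Int.floordiv_eq_iff_of_pos (by omega)]
            constructor <;> nlinarith [hb.1, hb.2]
          omega
        · have hq : pvNcols w sf (x + sf) = 1 := by
            unfold pvNcols; split_ifs with h <;> omega
          have : PySem.Int.floordiv (w - x) sf = 1 := by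
            rw [PySem.Int.floordiv_eq_iff_of_pos (by omega)]
            constructor <;> nlinarith
          omega
      have ih := pvRowAux_closed w rs0 rs1 sf y (x + sf)
      rw [pvRowAux]
      simp only [hX, hS]
      rw [ih, hrec, pyRange_map_shift _ (pvNcols_nonneg w sf (x + sf) (by omega)) _]
      simp only [hX, hS, dite_false, dite_true]
      congr 1
      · exact pvList4 (by ring) (by ring) rfl rfl
      · apply List.map_congr_left
        intro j _
        exact pvList4 (by ring) (by ring) rfl rfl
    · have hc : pvNcols w sf x = 1 := by unfold pvNcols; split_ifs with h <;> omega
      rw [pvRowAux, hc]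
      have h01 : PySem.List.pyRange 0 1 1 = [0] := by decide
      simp [hX, hS, h01]
termination_by x => (w - x).toNat
decreasing_by omega

-- A's loop, started anywhere inside a row y ≤ h whose guard holds, produces the remaining row
-- followed by whatever A produces from the start of the next row.
theorem pvLoopA_row (w h rs0 rs1 sf sd x y : Int)
    (hY : y ≤ h) (hG : 1 ≤ sd ∧ (1 ≤ sf ∨ w < x + sf)) :
    pvLoopA w h rs0 rs1 sf sd x y =
      pvRowAux w rs0 rs1 sf y x ++ pvLoopA w h rs0 rs1 sf sd rs0 (y + sd) := by
  by_cases hX : w < x + sf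
  · rw [pvLoopA, pvRowAux]
    simp [hG, hY, hX]
  · have hS : 1 ≤ sf := hG.2.resolve_right hX
    have ih := pvLoopA_row w h rs0 rs1 sf sd (x + sf) y hY ⟨hG.1, Or.inl hS⟩
    rw [pvLoopA, pvRowAux]
    simp [hG.1, hS, hY, hX, ih]
termination_by (w - x).toNat
decreasing_by omega

-- When the first row already overruns the image height, A's loop returns [].
theorem pvLoopA_empty (w h rs0 rs1 sf sd x y : Int) (hY : h < y) :
    pvLoopA w h rs0 rs1 sf sd x y = [] := by
  rw [pvLoopA]; split_ifs with h1 h2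
  · exact absurd h2 (by omega)
  · rfl
  · rfl

-- A's loop from the start of any row equals the closed-form grid.
theorem pvLoopA_closed (w h rs0 rs1 sf sd : Int)
    (hsd : 1 ≤ sd) (hsf : 1 ≤ sf ∨ w < rs0 + sf) : ∀ y,
    pvLoopA w h rs0 rs1 sf sd rs0 y
      = (PySem.List.pyRange 0 (pvNrows h sd y) 1).flatMap (fun i =>
          (PySem.List.pyRange 0 (pvNcols w sf rs0) 1).map (fun j =>
            [j * sf, rs0 + j * sf, y + i * sd - rs1, y + i * sd])) := by
  intro y
  by_cases hY : h < y
  · have hr : pvNrows h sd y = 0 := by unfold pvNrows; simp [hY]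
    rw [pvLoopA_empty _ _ _ _ _ _ _ _ hY, hr]
    simp [PySem.List.pyRange_one]
  · -- row count steps down by one
    have hrec : pvNrows h sd y = pvNrows h sd (y + sd) + 1 := by
      have hcy : pvNrows h sd y = PySem.Int.floordiv (h - y) sd + 1 := by
        unfold pvNrows; split_ifs with hh <;> omega
      by_cases h2 : y + sd ≤ h
      · have hq : pvNrows h sd (y + sd) = PySem.Int.floordiv (h - (y + sd)) sd + 1 := by
          unfold pvNrows; split_ifs with hh <;> omega
        set q := PySem.Int.floordiv (h - (y + sd)) sd with hqdef
        have hb : q * sd ≤ h - (y + sd) ∧ h - (y + sd) < (q + 1) * sd := by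
          rw [← PySem.Int.floordiv_eq_iff_of_pos (by omega)]
        have : PySem.Int.floordiv (h - y) sd = q + 1 := by
          rw [PySem.Int.floordiv_eq_iff_of_pos (by omega)]
          constructor <;> nlinarith [hb.1, hb.2]
        omega
      · have hq : pvNrows h sd (y + sd) = 0 := by
          unfold pvNrows; split_ifs with hh <;> omega
        have : PySem.Int.floordiv (h - y) sd = 0 := by
          rw [PySem.Int.floordiv_eq_iff_of_pos (by omega)]
          constructor <;> nlinarith
        omega
    have hnn : 0 ≤ pvNrows h sd (y + sd) := by
      unfold pvNrows
      split_ifs with hh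
      · omega
      · have : (0 : Int) ≤ PySem.Int.floordiv (h - (y + sd)) sd := by
          rw [PySem.Int.le_floordiv_iff_mul_le (by omega)]; omega
        omega
    have ih := pvLoopA_closed w h rs0 rs1 sf sd hsd hsf (y + sd)
    rw [pvLoopA_row w h rs0 rs1 sf sd rs0 y (by omega) ⟨hsd, hsf⟩, ih,
        pvRowAux_closed, hrec, pyRange_flatMap_shift _ hnn _]
    congr 1
    · apply List.map_congr_left
      intro j _
      exact pvList4 (by ring) (by ring) (by ring) (by ring)
    · apply List.flatMap_congr
      intro i _
      apply List.map_congr_left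
      intro j _
      exact pvList4 rfl rfl (by ring) (by ring)
termination_by y => (h - y + 1).toNat
decreasing_by omega

-- ===== VERDICT (by name: the statement is the Claim_ definition above) =====
theorem get_greed_rectangles_universal_spec : Claim_equal_get_greed_rectangles_universal := by
  intro w h rsp sfp sdp _hDom hPre
  unfold Spec_get_greed_rectangles_universal
  unfold get_greed_rectangles_universal get_greed_rectangles_universal_alt
  obtain ⟨-, -, -, -, -, hT⟩ := hPre
  simp only at hT ⊢
  set rs0₀ := pvRound w (PySem.List.pyGetD rsp 0 0)
  set rs1₀ := pvRound h (PySem.List.pyGetD rsp 1 0)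
  set sf₀ := pvRound w sfp
  set sd₀ := pvRound h sdp
  set rs0 := if w < h then rs1₀ else rs0₀
  set rs1 := if w < h then rs0₀ else rs1₀
  set sf := if w < h then sd₀ else sf₀
  set sd := if w < h then sf₀ else sd₀
  have hrows : (if h < rs1 then 0 else PySem.Int.floordiv (h - rs1) sd + 1) = pvNrows h sd rs1 := by
    unfold pvNrows; rfl
  have hcols : (if 0 < sf ∧ rs0 + sf ≤ w then PySem.Int.floordiv (w - rs0) sf + 1 else 1)
      = pvNcols w sf rs0 := by
    unfold pvNcols; rfl
  rw [hrows, hcols]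
  rcases hT with hT | hT
  · have hr : pvNrows h sd rs1 = 0 := by unfold pvNrows; simp [hT]
    rw [pvLoopA_empty _ _ _ _ _ _ _ _ hT, hr]
    simp [PySem.List.pyRange_one]
  · rw [pvLoopA_closed w h rs0 rs1 sf sd hT.1 hT.2 rs1]
    apply List.flatMap_congr
    intro i _
    apply List.map_congr_left
    intro j _
    exact pvList4 rfl (by ring) (by ring) (by ring)
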